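-- pv_equiv track=rewrite | github.com/daniel-reich/turbo-robot | PxxZprxCjDrzaTcLQ_9.py | vowel_links
-- ===== SOURCE A (Python) =====
-- def vowel_links(txt):
--     x = txt.split()
--     y = x.pop(0)
--     for item in x:
--         if item[0] in 'aeiou' and y[-1] in 'aeiou':
--
--             return True
--         else:
--             y = item
--
--     return False
-- ===== SOURCE B (Python) =====
-- def vowel_links(txt):
--     # Character-level state machine: never splits the text into words at all.
--     # Scans the raw characters once with O(1) state: `gap` = whitespace seen
--     # since the last word character, `last_vowel` = last word character was a
--     # vowel.  A link exists exactly when a vowel character follows a vowel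
--     # character across a (nonempty) whitespace gap.  Returns False (instead of
--     # raising) when txt contains no words.
--     vowels = 'aeiou'
--     gap = False
--     last_vowel = False
--     for c in txt:
--         if c.isspace():
--             gap = True
--         else:
--             if gap and last_vowel and c in vowels:
--                 return True
--             gap = False
--             last_vowel = c in vowels
--     return False
-- ===== Notes on version B (the rewrite author's own statement) =====
-- stated objective: alternative
-- what changed: Replaces A's split-into-words plus stateful previous-word loop by a single character-level state machine over the raw text (two O(1) boolean flags, no word list is ever built), detecting a vowel followed by a vowel across a whitespace gap.
import Mathlib
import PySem

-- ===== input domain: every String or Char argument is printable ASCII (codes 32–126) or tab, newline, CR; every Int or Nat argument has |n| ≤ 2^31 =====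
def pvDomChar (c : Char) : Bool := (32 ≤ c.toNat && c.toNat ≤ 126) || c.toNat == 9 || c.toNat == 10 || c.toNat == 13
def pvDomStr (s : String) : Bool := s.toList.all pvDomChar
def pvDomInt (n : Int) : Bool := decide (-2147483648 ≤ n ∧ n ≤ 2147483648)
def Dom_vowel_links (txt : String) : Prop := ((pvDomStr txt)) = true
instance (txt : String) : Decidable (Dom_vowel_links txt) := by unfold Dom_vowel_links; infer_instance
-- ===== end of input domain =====

-- B replaces A's word-splitting previous-word loop by a single character-level state
-- machine over the raw text (no word list is built); return value only.

-- ===== PORT A =====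
-- item[0] / y[-1] via pyGet?; split() words are nonempty, so the none case never fires.
def vlCond (item y : String) : Bool :=
  ((PySem.Str.pyGet? item 0).any fun c => "aeiou".toList.contains c) &&
  ((PySem.Str.pyGet? y (-1)).any fun c => "aeiou".toList.contains c)

def vlLoop (y : String) (rest : List String) : Bool :=
  match rest with
  | [] => false
  | item :: rest' => if vlCond item y then true else vlLoop item rest'

def vowel_links (txt : String) : Bool :=
  match PySem.Str.split₀ txt with
  | [] => false            -- Python raises IndexError here (x.pop(0)); excluded by Pre_
  | y :: x => vlLoop y x

-- ===== PORT B =====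
-- Source B's for-loop over the characters with the two boolean flags (gap, last_vowel).
def vlScan (cs : List Char) (gap lastVowel : Bool) : Bool :=
  match cs with
  | [] => false
  | c :: rest =>
    if PySem.Chars.isspace c then vlScan rest true lastVowel
    else if gap && lastVowel && "aeiou".toList.contains c then true
    else vlScan rest false ("aeiou".toList.contains c)

def vowel_links_alt (txt : String) : Bool :=
  vlScan txt.toList false false

-- ===== PRECONDITION & SPEC =====
-- Pre_ excludes txt with no words (empty/whitespace-only): there A's x.pop(0) raises IndexError.
def Pre_vowel_links (txt : String) : Prop := PySem.Str.split₀ txt ≠ []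
instance (txt : String) : Decidable (Pre_vowel_links txt) := by unfold Pre_vowel_links; infer_instance
def pvWitness_vowel_links : String := "sea otter"

def Spec_vowel_links (txt : String) (out : Bool) : Prop := out = vowel_links_alt txt
instance (txt : String) (out : Bool) : Decidable (Spec_vowel_links txt out) := by unfold Spec_vowel_links; infer_instance

-- ===== CLAIM (what is proved, stated in full; the proofs are below) =====
def Claim_equal_vowel_links : Prop := ∀ (txt : String), Dom_vowel_links txt → Pre_vowel_links txt → Spec_vowel_links txt (vowel_links txt)

-- ===== LEMMAS AND PROOFS =====

def vow (c : Char) : Bool := "aeiou".toList.contains c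
def wStart (w : List Char) : Bool := (PySem.List.pyGet? w 0).any vow
def wEnd (w : List Char) : Bool := (PySem.List.pyGet? w (-1)).any vow

-- word-list-level middle spec: prevV = previous word ended in a vowel
def chk (prevV : Bool) (ws : List (List Char)) : Bool :=
  match ws with
  | [] => false
  | w :: ws' => (prevV && wStart w) || chk (wEnd w) ws'

theorem vlLoop_eq_chk (rest : List String) (y : String) :
    vlLoop y rest = chk (wEnd y.toList) (rest.map String.toList) := by
  induction rest generalizing y with
  | nil => simp [vlLoop, chk]
  | cons it rest' ih =>
    have hc : vlCond it y = (wEnd y.toList && wStart it.toList) := by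
      simp only [vlCond, wEnd, wStart, PySem.Str.pyGet?_eq]
      exact Bool.and_comm _ _
    simp only [vlLoop, List.map_cons, chk, ih it, hc]
    cases wEnd y.toList && wStart it.toList <;> simp

theorem pyGet?_zero {α : Type} (c : α) (t : List α) :
    PySem.List.pyGet? (c :: t) 0 = some c := by
  simp [PySem.List.pyGet?, PySem.List.pyIdx?]

theorem go_acc (s : List Char) (cur : List Char) (acc : List (List Char)) :
    PySem.Chars.split₀.go s cur acc = acc.reverse ++ PySem.Chars.split₀.go s cur [] := by
  induction s generalizing cur acc with
  | nil =>
    by_cases h : cur.isEmpty <;> simp [PySem.Chars.split₀.go, h]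
  | cons c rest ih =>
    by_cases hs : PySem.Chars.isspace c
    · by_cases h : cur.isEmpty <;>
        simp [PySem.Chars.split₀.go, hs, h, ih [] acc, ih [] (cur.reverse :: acc),
          ih [] [cur.reverse]]
    · simp [PySem.Chars.split₀.go, hs, ih (c :: cur) acc]

theorem go_cons (s : List Char) (cur : List Char) (h : cur ≠ []) :
    ∃ t ws, PySem.Chars.split₀.go s cur [] = (cur.reverse ++ t) :: ws := by
  induction s generalizing cur with
  | nil =>
    refine ⟨[], [], ?_⟩
    simp [PySem.Chars.split₀.go, List.isEmpty_iff, h]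
  | cons c rest ih =>
    by_cases hs : PySem.Chars.isspace c
    · refine ⟨[], PySem.Chars.split₀.go rest [] [], ?_⟩
      simp [PySem.Chars.split₀.go, hs, List.isEmpty_iff, h, go_acc rest [] [cur.reverse]]
    · obtain ⟨t, ws, hw⟩ := ih (c :: cur) (by simp)
      exact ⟨c :: t, ws, by simp [PySem.Chars.split₀.go, hs, hw]⟩

-- head-form of chk: the first word is the word currently being built (no pair check against it)
def chkHead (ws : List (List Char)) : Bool :=
  match ws with
  | [] => false
  | w :: ws' => chk (wEnd w) ws'

theorem chk_false (ws : List (List Char)) : chk false ws = chkHead ws := by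
  cases ws <;> simp [chk, chkHead]

def lv (cur : List Char) : Bool :=
  match cur with
  | [] => false
  | c :: _ => vow c

-- the scanner invariant: gap = true ↔ between words (lastVowel = last word's final char);
-- gap = false with cur the reversed word being built (lastVowel = vow of last char read).
theorem vlScan_invariant (s : List Char) :
    (∀ lastV : Bool, vlScan s true lastV = chk lastV (PySem.Chars.split₀.go s [] [])) ∧
    (∀ cur : List Char, vlScan s false (lv cur) = chkHead (PySem.Chars.split₀.go s cur [])) := by
  induction s with
  | nil =>
    constructor
    · intro lastV; simp [vlScan, PySem.Chars.split₀.go, chk]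
    · intro cur
      by_cases h : cur.isEmpty <;>
        simp [vlScan, PySem.Chars.split₀.go, h, chkHead, chk]
  | cons c rest ih =>
    constructor
    · intro lastV
      by_cases hs : PySem.Chars.isspace c
      · simp [vlScan, hs, PySem.Chars.split₀.go, ih.1 lastV]
      · have h2 : vlScan rest false ("aeiou".toList.contains c) =
            chkHead (PySem.Chars.split₀.go rest [c] []) := ih.2 [c]
        obtain ⟨t, ws, hw⟩ := go_cons rest [c] (by simp)
        simp only [List.reverse_cons, List.reverse_nil, List.nil_append,
          List.singleton_append] at hw
        simp only [hw, chkHead] at h2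
        simp only [vlScan, hs, Bool.false_eq_true, if_false, Bool.true_and,
          PySem.Chars.split₀.go, hw, chk, wStart, pyGet?_zero, Option.any_some, h2]
        cases lastV <;>
          rw [show vow c = "aeiou".toList.contains c from rfl] <;>
          cases hvc : ("aeiou".toList.contains c) <;> simp
    · intro cur
      by_cases hs : PySem.Chars.isspace c
      · cases cur with
        | nil =>
          simp only [vlScan, hs, if_true, lv, PySem.Chars.split₀.go, List.isEmpty_nil]
          rw [ih.1 false, chk_false]
        | cons d cur' =>
          simp only [vlScan, hs, if_true, lv, PySem.Chars.split₀.go, List.isEmpty_cons]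
          rw [ih.1 (vow d), go_acc rest [] [(d :: cur').reverse]]
          simp only [List.reverse_cons, List.reverse_nil, List.nil_append, chkHead]
          congr 1
          simp [wEnd]
      · have h2 : vlScan rest false ("aeiou".toList.contains c) =
            chkHead (PySem.Chars.split₀.go rest (c :: cur) []) := ih.2 (c :: cur)
        simp only [vlScan, hs, Bool.false_eq_true, if_false, Bool.false_and, lv,
          PySem.Chars.split₀.go, h2]

-- ===== VERDICT (by name: the statement is the Claim_ definition above) =====
theorem vowel_links_spec : Claim_equal_vowel_links := by
  intro txt _ hpre
  unfold Spec_vowel_links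
  have hb : vlScan txt.toList false false = chkHead (PySem.Chars.split₀ txt.toList) := by
    have h := (vlScan_invariant txt.toList).2 []
    simpa [lv, PySem.Chars.split₀] using h
  have hmap := PySem.Str.split₀_map_toList txt
  cases h : PySem.Str.split₀ txt with
  | nil => exact absurd h hpre
  | cons y x =>
    simp only [vowel_links, vowel_links_alt, h]
    rw [hb, ← hmap, h]
    simp only [List.map_cons, chkHead]
    exact vlLoop_eq_chk x y
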